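-- pv_equiv track=rewrite | github.com/tarzaa1/kubegrapher | utils/utils.py | _placeholders
-- ===== SOURCE A (Python) =====
-- def _placeholders(properties=None, kwargs=None):
--     properties_placeholders = None
--     kwargs_placeholders = None
--     if properties is not None:
--         properties_placeholders = ', '.join(
--             [f'{key}: ${key}' for key in properties.keys()])
--     if kwargs is not None:
--         kwargs_placeholders = ', '.join(
--             [f'{key}: ${key}' for key in kwargs.keys()])
--
--     if properties_placeholders and kwargs_placeholders:
--         return f'{properties_placeholders}, {kwargs_placeholders}'
--     elif properties_placeholders:
--         return properties_placeholders
--     elif kwargs_placeholders: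
--         return kwargs_placeholders
--     else:
--         return ''
-- ===== SOURCE B (Python) =====
-- def _placeholders(properties=None, kwargs=None):
--     out = ''
--     for d in (properties, kwargs):
--         if d is not None:
--             for key in d:
--                 if out:
--                     out += ', '
--                 out += f'{key}: ${key}'
--     return out
-- ===== Notes on version B (the rewrite author's own statement) =====
-- stated objective: simpler
-- what changed: Replaces the two list-comprehension-plus-join builds and the four-way truthiness branch with a single accumulator loop over both dicts that emits ', ' before each item except the first; empty/None groups contribute nothing so no branching on the built strings is needed.
import Mathlib
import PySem

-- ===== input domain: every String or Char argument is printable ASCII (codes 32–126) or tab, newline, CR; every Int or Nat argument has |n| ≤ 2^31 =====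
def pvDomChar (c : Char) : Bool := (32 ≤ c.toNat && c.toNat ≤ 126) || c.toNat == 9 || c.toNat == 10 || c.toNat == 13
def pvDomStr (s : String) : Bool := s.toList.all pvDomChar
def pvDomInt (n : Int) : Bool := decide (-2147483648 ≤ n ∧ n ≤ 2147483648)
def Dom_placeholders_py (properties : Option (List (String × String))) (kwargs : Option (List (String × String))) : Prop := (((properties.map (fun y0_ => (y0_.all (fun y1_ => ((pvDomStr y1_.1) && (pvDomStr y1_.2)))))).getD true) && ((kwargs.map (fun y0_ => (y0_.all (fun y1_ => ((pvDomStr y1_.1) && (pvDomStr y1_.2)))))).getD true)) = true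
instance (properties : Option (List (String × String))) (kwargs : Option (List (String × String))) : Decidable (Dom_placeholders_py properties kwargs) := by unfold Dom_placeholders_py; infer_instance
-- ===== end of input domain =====

-- ===== PORT A =====
-- B replaces A's two per-dict join builds plus the four-way truthiness branch with one
-- accumulator loop emitting ', ' before every item except the first; objective: simpler.

-- A-side helper: f'{key}: ${key}'
def phItemA (k : String) : List Char := k.toList ++ [':', ' ', '$'] ++ k.toList

-- A-side helper: ', '.join([f'{key}: ${key}' for key in d.keys()])
def phJoinA (d : List (String × String)) : List Char :=
  PySem.Chars.join [',', ' '] (d.map fun kv => phItemA kv.1)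

def placeholders_py (properties : Option (List (String × String))) (kwargs : Option (List (String × String))) : String :=
  let properties_placeholders : Option (List Char) :=
    match properties with
    | none => none
    | some d => some (phJoinA d)
  let kwargs_placeholders : Option (List Char) :=
    match kwargs with
    | none => none
    | some d => some (phJoinA d)
  -- Python truthiness: None and '' are falsy, any other string truthy
  if properties_placeholders.getD [] ≠ [] ∧ kwargs_placeholders.getD [] ≠ [] then
    String.ofList (properties_placeholders.getD [] ++ [',', ' '] ++ kwargs_placeholders.getD [])
  else if properties_placeholders.getD [] ≠ [] then
    String.ofList (properties_placeholders.getD [])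
  else if kwargs_placeholders.getD [] ≠ [] then
    String.ofList (kwargs_placeholders.getD [])
  else
    ""

-- ===== PORT B =====
-- B-side helper: the loop body — if out: out += ', '; out += f'{key}: ${key}'
def phStepB (out : List Char) (k : String) : List Char :=
  (if out ≠ [] then out ++ [',', ' '] else out) ++ k.toList ++ [':', ' ', '$'] ++ k.toList

-- B-side helper: the inner 'for key in d' loop over one optional dict
def phLoopB (out : List Char) (d : Option (List (String × String))) : List Char :=
  match d with
  | none => out
  | some l => l.foldl (fun acc kv => phStepB acc kv.1) out

def placeholders_py_alt (properties : Option (List (String × String))) (kwargs : Option (List (String × String))) : String :=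
  String.ofList (phLoopB (phLoopB [] properties) kwargs)

-- ===== PRECONDITION & SPEC =====
def Spec_placeholders_py (properties : Option (List (String × String))) (kwargs : Option (List (String × String))) (out : String) : Prop := out = placeholders_py_alt properties kwargs
instance (properties : Option (List (String × String))) (kwargs : Option (List (String × String))) (out : String) : Decidable (Spec_placeholders_py properties kwargs out) := by unfold Spec_placeholders_py; infer_instance

-- ===== CLAIM (what is proved, stated in full; the proofs are below) =====
def Claim_equal_placeholders_py : Prop := ∀ (properties : Option (List (String × String))) (kwargs : Option (List (String × String))), Dom_placeholders_py properties kwargs → Spec_placeholders_py properties kwargs (placeholders_py properties kwargs)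

-- ===== LEMMAS AND PROOFS =====

lemma phItemA_ne_nil (k : String) : phItemA k ≠ [] := by
  simp [phItemA]

lemma intercalate_cons_of_ne {α : Type} (sep x : List α) (xs : List (List α)) (h : xs ≠ []) :
    List.intercalate sep (x :: xs) = x ++ sep ++ List.intercalate sep xs := by
  cases xs with
  | nil => exact absurd rfl h
  | cons y t => simp [List.intercalate, List.intersperse]

lemma phJoinA_cons (kv : String × String) (t : List (String × String)) :
    phJoinA (kv :: t) = phItemA kv.1 ++ t.flatMap (fun kv' => [',', ' '] ++ phItemA kv'.1) := by
  induction t generalizing kv with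
  | nil => simp [phJoinA, PySem.Chars.join, List.intercalate]
  | cons kv2 t2 ih =>
    have h : phJoinA (kv :: kv2 :: t2) = phItemA kv.1 ++ [',', ' '] ++ phJoinA (kv2 :: t2) := by
      simp only [phJoinA, PySem.Chars.join, List.map]
      exact intercalate_cons_of_ne _ _ _ (by simp)
    rw [h, ih kv2]
    simp

lemma phJoinA_ne_nil (d : List (String × String)) (h : d ≠ []) : phJoinA d ≠ [] := by
  cases d with
  | nil => exact absurd rfl h
  | cons kv t =>
    rw [phJoinA_cons]
    simp [phItemA]

-- accumulator invariant of B's loop for a nonempty accumulator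
lemma foldl_stepB_ne (l : List (String × String)) (acc : List Char) (h : acc ≠ []) :
    l.foldl (fun a kv => phStepB a kv.1) acc =
      acc ++ l.flatMap (fun kv => [',', ' '] ++ phItemA kv.1) := by
  induction l generalizing acc with
  | nil => simp
  | cons kv t ih =>
    simp only [List.foldl, List.flatMap_cons]
    rw [ih (phStepB acc kv.1) (by simp [phStepB, h])]
    simp [phStepB, h, phItemA]

-- B's loop started from the empty accumulator computes A's per-dict join
lemma foldl_stepB_nil (l : List (String × String)) :
    l.foldl (fun a kv => phStepB a kv.1) [] = phJoinA l := by
  cases l with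
  | nil => simp [phJoinA, PySem.Chars.join, List.intercalate]
  | cons kv t =>
    simp only [List.foldl]
    have h0 : phStepB [] kv.1 = phItemA kv.1 := by simp [phStepB, phItemA]
    rw [h0, foldl_stepB_ne t _ (phItemA_ne_nil kv.1), phJoinA_cons]

theorem placeholders_py_spec : Claim_equal_placeholders_py := by
  intro properties kwargs _
  unfold Spec_placeholders_py
  have core : ∀ (a b : List (String × String)),
      placeholders_py (some a) (some b) = placeholders_py_alt (some a) (some b) := by
    intro a b
    by_cases ha : a = []
    · subst ha
      by_cases hb : b = []
      · subst hb
        simp only [placeholders_py, placeholders_py_alt, phLoopB, phJoinA, PySem.Chars.join,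
          List.intercalate, List.map, List.foldl]
        rfl
      · simp [placeholders_py, placeholders_py_alt, phLoopB,
          foldl_stepB_nil, phJoinA, PySem.Chars.join, List.intercalate]
    · by_cases hb : b = []
      · subst hb
        simp [placeholders_py, placeholders_py_alt, phLoopB,
          foldl_stepB_nil, phJoinA, PySem.Chars.join, List.intercalate]
      · cases b with
        | nil => exact absurd rfl hb
        | cons kv2 t2 =>
          simp only [placeholders_py, placeholders_py_alt, phLoopB]
          rw [foldl_stepB_nil a,
            foldl_stepB_ne (kv2 :: t2) (phJoinA a) (phJoinA_ne_nil a ha)]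
          simp [phJoinA_ne_nil a ha, phJoinA_cons]
          intro h
          exact absurd h (phItemA_ne_nil kv2.1)
  have hnoneA : ∀ k, placeholders_py none k = placeholders_py (some []) k := by
    intro k
    simp [placeholders_py, phJoinA, PySem.Chars.join, List.intercalate]
  have hnoneA2 : ∀ p, placeholders_py p none = placeholders_py p (some []) := by
    intro p
    simp [placeholders_py, phJoinA, PySem.Chars.join, List.intercalate]
  have hnoneB : ∀ k, placeholders_py_alt none k = placeholders_py_alt (some []) k := by
    intro k; simp [placeholders_py_alt, phLoopB]
  have hnoneB2 : ∀ p, placeholders_py_alt p none = placeholders_py_alt p (some []) := by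
    intro p; cases p <;> simp [placeholders_py_alt, phLoopB]
  cases properties with
  | none =>
    cases kwargs with
    | none => rw [hnoneA, hnoneA2, core, ← hnoneB2, ← hnoneB]
    | some b => rw [hnoneA, core, ← hnoneB]
  | some a =>
    cases kwargs with
    | none => rw [hnoneA2, core, ← hnoneB2]
    | some b => rw [core]
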